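-- pv_equiv track=rewrite | github.com/shub1905/spreadSheet | utils.py | keyVal
-- ===== SOURCE A (Python) =====
-- def keyVal(var):
--     '''
--         Convert Spread Sheet Key to row,column
--         eg: AB36: (35, 27)
--     '''
--     column, row = 0, 0
--     for i, char in enumerate(var):
--         if char <= 'Z' and char >= 'A':
--             column = column * 26 + (ord(char) - ord('A') + 1)
--         else:
--             row = int(var[i:])
--             break
--     return [row - 1, column - 1]
-- ===== SOURCE B (Python) =====
-- def keyVal(var):
--     '''
--         Convert Spread Sheet Key to row,column
--         eg: AB36: (35, 27)
--     '''
--     def go(s):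
--         # returns (column, letter_count, row) for the key s, by structural
--         # recursion: each letter contributes (ord(c)-64) * 26**k where k is the
--         # number of letters to its right; the first non-letter ends the key
--         # and carries the row.
--         if not s:
--             return (0, 0, 0)
--         c = s[0]
--         if 'A' <= c <= 'Z':
--             col, k, row = go(s[1:])
--             return ((ord(c) - 64) * 26 ** k + col, k + 1, row)
--         return (0, 0, int(s))
--     column, _, row = go(var)
--     return [row - 1, column - 1]
-- ===== Notes on version B (the rewrite author's own statement) =====
-- stated objective: alternative
-- what changed: Replaces A's iterative left-to-right Horner accumulation (column = column*26 + digit) with structural recursion that assigns each letter an explicit place value (ord(c)-64)*26**k based on the count of letters to its right, combining results on the way back out of the recursion; the row comes from the recursion's base case.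
import Mathlib
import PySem

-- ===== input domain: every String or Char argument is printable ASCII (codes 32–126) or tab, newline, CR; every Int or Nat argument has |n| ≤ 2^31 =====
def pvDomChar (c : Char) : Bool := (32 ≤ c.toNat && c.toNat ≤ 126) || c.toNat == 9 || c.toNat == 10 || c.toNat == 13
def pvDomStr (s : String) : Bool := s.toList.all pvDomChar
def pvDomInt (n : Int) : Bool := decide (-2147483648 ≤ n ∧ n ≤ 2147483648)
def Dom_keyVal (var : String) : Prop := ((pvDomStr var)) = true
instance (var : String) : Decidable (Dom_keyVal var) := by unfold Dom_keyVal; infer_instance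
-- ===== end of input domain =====

-- B replaces A's left-to-right Horner accumulation by structural recursion with
-- explicit place values (each letter weighted by 26^(letters to its right)); alternative decomposition.

-- ===== PORT A =====
-- A's loop: walks the characters with their index; uppercase letters update column
-- by Horner's rule, the first other character sets row = int(var[i:]) and breaks.
def keyValGo (orig : List Char) : List Char → Nat → Int → Int → Int × Int
  | [], _, col, row => (row, col)
  | c :: rest, i, col, row =>
    if c ≤ 'Z' ∧ 'A' ≤ c then
      keyValGo orig rest (i + 1) (col * 26 + ((c.toNat : Int) - 65 + 1)) row
    else
      ((PySem.Int.ofStr? (String.mk (orig.drop i))).getD 0, col)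

def keyVal (var : String) : List Int :=
  let (row, col) := keyValGo var.toList var.toList 0 0 0
  [row - 1, col - 1]

-- ===== PORT B =====
-- B's recursion: returns (column, letter_count, row); a letter contributes
-- (ord(c)-64) * 26^k with k the number of letters to its right; the first
-- non-letter is the base case carrying row = int(s).
def keyValAltGo : List Char → Int × Nat × Int
  | [] => (0, 0, 0)
  | c :: rest =>
    if 'A' ≤ c ∧ c ≤ 'Z' then
      let (col, k, row) := keyValAltGo rest
      (((c.toNat : Int) - 64) * (26 : Int) ^ k + col, k + 1, row)
    else
      (0, 0, (PySem.Int.ofStr? (String.mk (c :: rest))).getD 0)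

def keyVal_alt (var : String) : List Int :=
  let (column, _, row) := keyValAltGo var.toList
  [row - 1, column - 1]

-- ===== PRECONDITION & SPEC =====
-- Pre_ excludes exactly the inputs where Python A raises ValueError: those whose
-- part after the uppercase-letter prefix is non-empty but not parseable by int().
def Pre_keyVal (var : String) : Prop :=
  let suffix := var.toList.dropWhile (fun c => decide ('A' ≤ c ∧ c ≤ 'Z'))
  suffix = [] ∨ (PySem.Int.ofStr? (String.mk suffix)).isSome
instance (var : String) : Decidable (Pre_keyVal var) := by unfold Pre_keyVal; infer_instance

def pvWitness_keyVal : String := "AB36"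

def Spec_keyVal (var : String) (out : List Int) : Prop := out = keyVal_alt var
instance (var : String) (out : List Int) : Decidable (Spec_keyVal var out) := by unfold Spec_keyVal; infer_instance

-- ===== CLAIM (what is proved, stated in full; the proofs are below) =====
def Claim_equal_keyVal : Prop := ∀ (var : String), Dom_keyVal var → Pre_keyVal var → Spec_keyVal var (keyVal var)

-- ===== LEMMAS AND PROOFS =====

-- Shifting the Horner accumulator: foldl from col = col * 26^|L| + foldl from 0.
theorem horner_shift (L : List Char) :
    ∀ col : Int,
      L.foldl (fun col c => col * 26 + ((c.toNat : Int) - 65 + 1)) col =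
      col * (26 : Int) ^ L.length +
        L.foldl (fun col c => col * 26 + ((c.toNat : Int) - 65 + 1)) 0 := by
  induction L with
  | nil => intro col; simp
  | cons c rest ih =>
    intro col
    simp only [List.foldl, List.length_cons]
    rw [ih (col * 26 + ((c.toNat : Int) - 65 + 1)), ih (0 * 26 + ((c.toNat : Int) - 65 + 1))]
    ring

-- B's recursion computes A's Horner value of the takeWhile letter prefix, its
-- length, and int() of the rest (0 when the rest is empty).
theorem keyValAltGo_eq (cs : List Char) :
    keyValAltGo cs =
      ((cs.takeWhile (fun c => decide ('A' ≤ c ∧ c ≤ 'Z'))).foldl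
         (fun col c => col * 26 + ((c.toNat : Int) - 65 + 1)) 0,
       (cs.takeWhile (fun c => decide ('A' ≤ c ∧ c ≤ 'Z'))).length,
       if (cs.drop (cs.takeWhile (fun c => decide ('A' ≤ c ∧ c ≤ 'Z'))).length).isEmpty then (0 : Int)
       else (PySem.Int.ofStr? (String.mk (cs.drop (cs.takeWhile (fun c => decide ('A' ≤ c ∧ c ≤ 'Z'))).length))).getD 0) := by
  induction cs with
  | nil => simp [keyValAltGo]
  | cons c rest ih =>
    by_cases hc : 'A' ≤ c ∧ c ≤ 'Z'
    · rw [keyValAltGo, if_pos hc, ih]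
      simp only [hc, List.takeWhile_cons, decide_true, and_self, if_true, List.length_cons,
        List.foldl, List.drop_succ_cons]
      refine Prod.ext ?_ rfl
      simp only
      rw [horner_shift _ (0 * 26 + ((c.toNat : Int) - 65 + 1))]
      ring
    · rw [keyValAltGo, if_neg hc]
      simp [hc]

-- A's loop computes: column = Horner fold over the takeWhile letter prefix;
-- row = 0 if the rest is empty, else int() of it.
theorem keyValGo_eq (orig : List Char) (cs : List Char) :
    ∀ (i : Nat) (col : Int), cs = orig.drop i →
    keyValGo orig cs i col 0 =
      ((if (cs.drop (cs.takeWhile (fun c => decide ('A' ≤ c ∧ c ≤ 'Z'))).length).isEmpty then (0 : Int)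
        else (PySem.Int.ofStr? (String.mk (cs.drop (cs.takeWhile (fun c => decide ('A' ≤ c ∧ c ≤ 'Z'))).length))).getD 0),
       (cs.takeWhile (fun c => decide ('A' ≤ c ∧ c ≤ 'Z'))).foldl
         (fun col c => col * 26 + ((c.toNat : Int) - 65 + 1)) col) := by
  induction cs with
  | nil => intro i col h; simp [keyValGo]
  | cons c rest ih =>
    intro i col h
    by_cases hc : 'A' ≤ c ∧ c ≤ 'Z'
    · have hrest : rest = orig.drop (i + 1) := by
        have := congrArg List.tail h
        simpa [List.tail_drop] using this
      have hcond : (c ≤ 'Z' ∧ 'A' ≤ c) := ⟨hc.2, hc.1⟩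
      rw [keyValGo, if_pos hcond]
      rw [ih (i + 1) (col * 26 + ((c.toNat : Int) - 65 + 1)) hrest]
      simp [hc]
    · have hcond : ¬ (c ≤ 'Z' ∧ 'A' ≤ c) := fun h' => hc ⟨h'.2, h'.1⟩
      rw [keyValGo, if_neg hcond]
      simp [hc, ← h]

-- ===== VERDICT (by name: the statement is the Claim_ definition above) =====
theorem keyVal_spec : Claim_equal_keyVal := by
  intro var _ _
  unfold Spec_keyVal keyVal keyVal_alt
  rw [keyValGo_eq var.toList var.toList 0 0 rfl, keyValAltGo_eq]
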